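-- pv_equiv track=rewrite | github.com/spartan-hieunguyen/SpellingCorrectorApp | backend/autocorrection/test.py | smoke_cigar
-- ===== SOURCE A (Python) =====
-- def smoke_cigar(cigar, src=[], trg=[]):
--   ans = []
--   number = 0
--   query_align = 0
--   target_align = 0
--   for c in cigar:
--     if c.isdigit():
--       number = number * 10
--       number += int(c)
--     else:
--       if c == "=":
--         ans.extend([(query_align + i, target_align + i) for i in range(number)])
--         query_align  += number
--         target_align += number
--       elif c == "I":
--         ans.append((-1, target_align))
--         target_align += 1
--       elif c == "D":
--         ans.append((query_align, -1))
--         query_align += 1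
--       else:
--         ans.append((query_align, target_align))
--         target_align += 1
--         query_align += 1
--       number = 0
--   if src:
--     assert len(ans) == len(src)
--
--   return ans
-- ===== SOURCE B (Python) =====
-- import re
-- from itertools import accumulate
--
-- def smoke_cigar(cigar, src=[], trg=[]):
--     # Staged pipeline: tokenize, compute per-token deltas, prefix-sum the start
--     # positions with accumulate, then emit everything in one flat comprehension.
--     toks = [(int(n) if n else 0, op) for n, op in re.findall(r'(\d*)(\D)', cigar)]
--     deltas = [(n, n) if op == "=" else
--               (0, 1) if op == "I" else
--               (1, 0) if op == "D" else
--               (1, 1) for n, op in toks]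
--     starts = accumulate(deltas, lambda a, b: (a[0] + b[0], a[1] + b[1]),
--                         initial=(0, 0))
--     ans = [pair
--            for (n, op), (q, t) in zip(toks, starts)
--            for pair in ([(q + i, t + i) for i in range(n)] if op == "="
--                         else [(-1, t)] if op == "I"
--                         else [(q, -1)] if op == "D"
--                         else [(q, t)])]
--     if src:
--         assert len(ans) == len(src)
--     return ans
-- ===== Notes on version B (the rewrite author's own statement) =====
-- stated objective: alternative
-- what changed: B replaces A's single character-by-character scan with mutable accumulators by a staged pipeline: regex-tokenize the CIGAR into (count, op) pairs, map each token to its (query, target) delta, prefix-sum the deltas with itertools.accumulate to get each token's start positions, and emit all pairs in one flat comprehension over zip(tokens, starts).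
import Mathlib
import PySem

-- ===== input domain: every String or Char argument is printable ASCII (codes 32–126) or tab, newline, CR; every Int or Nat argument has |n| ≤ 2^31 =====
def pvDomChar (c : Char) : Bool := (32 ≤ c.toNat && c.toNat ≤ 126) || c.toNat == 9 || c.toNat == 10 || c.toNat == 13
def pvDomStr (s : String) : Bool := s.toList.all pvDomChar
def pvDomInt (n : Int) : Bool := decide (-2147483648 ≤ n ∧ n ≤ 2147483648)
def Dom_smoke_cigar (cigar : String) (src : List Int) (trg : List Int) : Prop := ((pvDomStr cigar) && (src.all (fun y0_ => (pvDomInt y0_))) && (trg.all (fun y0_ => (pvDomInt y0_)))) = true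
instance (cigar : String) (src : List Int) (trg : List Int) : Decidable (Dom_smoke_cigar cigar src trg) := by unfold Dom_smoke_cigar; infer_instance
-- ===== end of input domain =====

-- B is a staged pipeline — regex-tokenize, map tokens to deltas, prefix-sum the start
-- positions with scanl/accumulate, then emit all pairs in one flatMap — replacing A's
-- single character scan with a mutable digit accumulator (objective: alternative).


-- ===== PORT A =====
-- one step of A's for-loop; state = (ans, number, query_align, target_align)
def smoke_cigarStepA (st : List (Int × Int) × Int × Int × Int) (c : Char) :
    List (Int × Int) × Int × Int × Int :=
  let (ans, number, query_align, target_align) := st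
  if c.isDigit then
    (ans, number * 10 + ((c.toNat : Int) - 48), query_align, target_align)
  else if c = '=' then
    (ans ++ (PySem.List.pyRange 0 number 1).map (fun i => (query_align + i, target_align + i)),
     0, query_align + number, target_align + number)
  else if c = 'I' then
    (ans ++ [((-1 : Int), target_align)], 0, query_align, target_align + 1)
  else if c = 'D' then
    (ans ++ [(query_align, (-1 : Int))], 0, query_align + 1, target_align)
  else
    (ans ++ [(query_align, target_align)], 0, query_align + 1, target_align + 1)

-- the trailing `if src: assert len(ans) == len(src)` passes on every input in Pre_ (see Pre_ below)
def smoke_cigar (cigar : String) (src : List Int) (trg : List Int) : List (Int × Int) :=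
  (cigar.toList.foldl smoke_cigarStepA ([], 0, 0, 0)).1

-- ===== PORT B =====
-- int(count_str): exact for the digit-only groups the regex produces
def smoke_cigarIntOfDigits (ds : List Char) : Int :=
  ds.foldl (fun a c => a * 10 + ((c.toNat : Int) - 48)) 0

-- re.findall(r'(\d*)(\D)', cigar) + int conversion: each match is (digit run as int,
-- one non-digit); a trailing digit run matches no '\D' and is dropped.  Hand port, exact.
def smoke_cigarTokens : List Char → List Char → List (Int × Char)
  | [], _ => []
  | c :: rest, ds =>
    if c.isDigit then smoke_cigarTokens rest (ds ++ [c])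
    else ((if ds = [] then 0 else smoke_cigarIntOfDigits ds), c) :: smoke_cigarTokens rest []

-- per-token (query, target) advance
def smoke_cigarDelta (tok : Int × Char) : Int × Int :=
  if tok.2 = '=' then (tok.1, tok.1)
  else if tok.2 = 'I' then (0, 1)
  else if tok.2 = 'D' then (1, 0)
  else (1, 1)

-- pairs a token emits, given its start positions
def smoke_cigarEmit (tok : Int × Char) (st : Int × Int) : List (Int × Int) :=
  if tok.2 = '=' then (PySem.List.pyRange 0 tok.1 1).map (fun i => (st.1 + i, st.2 + i))
  else if tok.2 = 'I' then [((-1 : Int), st.2)]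
  else if tok.2 = 'D' then [(st.1, (-1 : Int))]
  else [(st.1, st.2)]

def smoke_cigar_alt (cigar : String) (src : List Int) (trg : List Int) : List (Int × Int) :=
  let toks := smoke_cigarTokens cigar.toList []
  let deltas := toks.map smoke_cigarDelta
  let starts := deltas.scanl (fun a b => (a.1 + b.1, a.2 + b.2)) ((0 : Int), (0 : Int))
  (toks.zip starts).flatMap (fun p => smoke_cigarEmit p.1 p.2)

-- ===== PRECONDITION & SPEC =====
-- length of the alignment list A builds, as a direct fold over the CIGAR string
def smoke_cigarOutLen (cigar : String) : Int :=
  (cigar.toList.foldl (fun (p : Int × Int) c =>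
    if c.isDigit then (p.1, p.2 * 10 + ((c.toNat : Int) - 48))
    else if c = '=' then (p.1 + p.2, 0) else (p.1 + 1, 0)) (0, 0)).1

-- Pre_ excludes exactly the inputs on which A's trailing assert fails (src nonempty and the
-- alignment length differs from len(src)): there A raises AssertionError and returns nothing.
def Pre_smoke_cigar (cigar : String) (src : List Int) (trg : List Int) : Prop :=
  src = [] ∨ smoke_cigarOutLen cigar = (src.length : Int)
instance (cigar : String) (src : List Int) (trg : List Int) : Decidable (Pre_smoke_cigar cigar src trg) := by unfold Pre_smoke_cigar; infer_instance

def pvWitness_smoke_cigar : String × List Int × List Int := ("3=1I2D", [], [])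

def Spec_smoke_cigar (cigar : String) (src : List Int) (trg : List Int) (out : List (Int × Int)) : Prop := out = smoke_cigar_alt cigar src trg
instance (cigar : String) (src : List Int) (trg : List Int) (out : List (Int × Int)) : Decidable (Spec_smoke_cigar cigar src trg out) := by unfold Spec_smoke_cigar; infer_instance

-- ===== CLAIM =====
def Claim_equal_smoke_cigar : Prop := ∀ (cigar : String) (src : List Int) (trg : List Int), Dom_smoke_cigar cigar src trg → Pre_smoke_cigar cigar src trg → Spec_smoke_cigar cigar src trg (smoke_cigar cigar src trg)

-- ===== LEMMAS AND PROOFS =====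

-- B's zip/scanl/flatMap pipeline, generalized to an arbitrary start state
def smoke_cigarGlue (toks : List (Int × Char)) (q t : Int) : List (Int × Int) :=
  (toks.zip ((toks.map smoke_cigarDelta).scanl
    (fun a b => (a.1 + b.1, a.2 + b.2)) (q, t))).flatMap (fun p => smoke_cigarEmit p.1 p.2)

lemma smoke_cigarGlue_cons (tok : Int × Char) (rest : List (Int × Char)) (q t : Int) :
    smoke_cigarGlue (tok :: rest) q t
      = smoke_cigarEmit tok (q, t)
        ++ smoke_cigarGlue rest (q + (smoke_cigarDelta tok).1) (t + (smoke_cigarDelta tok).2) := by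
  simp [smoke_cigarGlue, List.scanl]

lemma smoke_cigar_alt_eq_glue (cigar : String) (src trg : List Int) :
    smoke_cigar_alt cigar src trg = smoke_cigarGlue (smoke_cigarTokens cigar.toList []) 0 0 := rfl

lemma smoke_cigarIntOfDigits_append (ds : List Char) (c : Char) :
    smoke_cigarIntOfDigits (ds ++ [c])
      = smoke_cigarIntOfDigits ds * 10 + ((c.toNat : Int) - 48) := by
  simp [smoke_cigarIntOfDigits, List.foldl_append]

lemma smoke_cigarIntOfDigits_ite (ds : List Char) :
    (if ds = [] then (0 : Int) else smoke_cigarIntOfDigits ds) = smoke_cigarIntOfDigits ds := by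
  cases ds <;> simp [smoke_cigarIntOfDigits]

lemma smoke_cigar_key (cs : List Char) :
    ∀ (ds : List Char) (ans : List (Int × Int)) (q t : Int),
      (cs.foldl smoke_cigarStepA (ans, smoke_cigarIntOfDigits ds, q, t)).1
        = ans ++ smoke_cigarGlue (smoke_cigarTokens cs ds) q t := by
  induction cs with
  | nil => intro ds ans q t; simp [smoke_cigarTokens, smoke_cigarGlue]
  | cons c rest ih =>
    intro ds ans q t
    by_cases hd : c.isDigit
    · have h1 : smoke_cigarStepA (ans, smoke_cigarIntOfDigits ds, q, t) c
          = (ans, smoke_cigarIntOfDigits (ds ++ [c]), q, t) := by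
        simp [smoke_cigarStepA, hd, smoke_cigarIntOfDigits_append]
      simp only [List.foldl_cons, h1, smoke_cigarTokens, if_pos hd]
      exact ih (ds ++ [c]) ans q t
    · simp only [List.foldl_cons, smoke_cigarTokens, if_neg hd]
      set n := smoke_cigarIntOfDigits ds with hn
      have htok : ((if ds = [] then (0 : Int) else smoke_cigarIntOfDigits ds), c) = (n, c) := by
        rw [smoke_cigarIntOfDigits_ite]
      rw [htok, smoke_cigarGlue_cons]
      by_cases he : c = '='
      · have hA : smoke_cigarStepA (ans, n, q, t) c
            = (ans ++ (PySem.List.pyRange 0 n 1).map (fun i => (q + i, t + i)),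
               0, q + n, t + n) := by
          simp [smoke_cigarStepA, hd, he]
        rw [hA]
        simp only [smoke_cigarEmit, smoke_cigarDelta, he, if_pos rfl, ← List.append_assoc]
        exact ih [] _ _ _
      · by_cases hI : c = 'I'
        · have hA : smoke_cigarStepA (ans, n, q, t) c
              = (ans ++ [((-1 : Int), t)], 0, q, t + 1) := by
            simp [smoke_cigarStepA, hd, he, hI]
          rw [hA]
          simp only [smoke_cigarEmit, smoke_cigarDelta, he, hI, if_neg, if_pos rfl,
            reduceCtorEq, ← List.append_assoc, add_zero]
          have := ih [] (ans ++ [((-1 : Int), t)]) q (t + 1)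
          simpa using this
        · by_cases hD : c = 'D'
          · have hA : smoke_cigarStepA (ans, n, q, t) c
                = (ans ++ [(q, (-1 : Int))], 0, q + 1, t) := by
              simp [smoke_cigarStepA, hd, he, hI, hD]
            rw [hA]
            simp only [smoke_cigarEmit, smoke_cigarDelta, he, hI, hD, if_neg, if_pos rfl,
              reduceCtorEq, ← List.append_assoc, add_zero]
            have := ih [] (ans ++ [(q, (-1 : Int))]) (q + 1) t
            simpa using this
          · have hA : smoke_cigarStepA (ans, n, q, t) c
                = (ans ++ [(q, t)], 0, q + 1, t + 1) := by
              simp [smoke_cigarStepA, hd, he, hI, hD]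
            rw [hA]
            simp only [smoke_cigarEmit, smoke_cigarDelta, he, hI, hD, if_neg,
              ← List.append_assoc]
            have := ih [] (ans ++ [(q, t)]) (q + 1) (t + 1)
            simpa [he, hI, hD] using this

-- ===== VERDICT =====
theorem smoke_cigar_spec : Claim_equal_smoke_cigar := by
  intro cigar src trg _ _
  show smoke_cigar cigar src trg = smoke_cigar_alt cigar src trg
  rw [smoke_cigar_alt_eq_glue]
  unfold smoke_cigar
  have key := smoke_cigar_key cigar.toList [] [] 0 0
  simp only [show smoke_cigarIntOfDigits [] = 0 from rfl] at key
  rw [key]; simp
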